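-- pv_equiv track=rewrite | github.com/lamperi/aoc | 2021/20/solve.py | get_lit_pixels
-- ===== SOURCE A (Python) =====
-- from copy import deepcopy
--
-- def get_window(image, y, x, d):
--     for yd in (-1, 0, 1):
--         for xd in (-1, 0, 1):
--             if 0 <= y+yd < len(image) and 0 <= x+xd < len(image[y+yd]):
--                 yield image[y+yd][x+xd]
--             else:
--                 yield d
--
-- def get_lit_pixels(data, t):
--     enchancement, image = data.split("\n\n")
--     # Make image mutable
--     image = [[c for c in line] for line in image.splitlines()]
--     d = "."
--     for _ in range(t):
--         # pad image by one pixel because the window is 3x3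
--         # fill with the appropriate default pixel for the iteration
--         image = [[d]*(len(image[0])+2)] + [[d] + line + [d] for line in image] + [[d]*(len(image[0])+2)]
--         newimage = deepcopy(image)
--         for y in range(0, len(newimage)):
--             for x in range(0, len(newimage[y])):
--                 binary = ["1" if c == "#" else "0" for c in get_window(image, y, x, d)]
--                 index = int("".join(binary), 2)
--                 newimage[y][x] = enchancement[index]
--         image = newimage
--         # Note: depending on what the 0 value enchancement resolves, we need to
--         # change the default fill value of the infinite image.
--         if enchancement[0] == "#":
--             d = "." if d == "#" else "#"
--
--     return "".join("".join(l) for l in image).count("#")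
-- ===== SOURCE B (Python) =====
-- OFFSW = (((-1, -1), 256), ((-1, 0), 128), ((-1, 1), 64),
--          ((0, -1), 32), ((0, 0), 16), ((0, 1), 8),
--          ((1, -1), 4), ((1, 0), 2), ((1, 1), 1))
--
-- def get_lit_pixels(data, t):
--     enh, img = data.split("\n\n")
--     lines = img.splitlines()
--     # sparse lit set + background flag; each step SCATTERS 9-bit weights from
--     # source pixels into an accumulator dict instead of gathering 3x3 windows
--     lit = {(y, x)
--            for y, line in enumerate(lines)
--            for x, c in enumerate(line)
--            if c == "#"}
--     h = len(lines)
--     w = len(lines[0]) if lines else 0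
--     bg = False
--     for _ in range(t):
--         # when the infinite background is lit, stamp from the DARK cells of the
--         # box and complement the index (511 - acc), since off-neighbours are
--         # exactly the in-box dark cells then
--         if bg:
--             src = [(y, x) for y in range(h) for x in range(w) if (y, x) not in lit]
--         else:
--             src = lit
--         acc = {}
--         for p in src:
--             for (dy, dx), wgt in OFFSW:
--                 c = (p[0] - dy, p[1] - dx)
--                 acc[c] = acc.get(c, 0) + wgt
--         nlit = set()
--         for y in range(-1, h + 1):
--             for x in range(-1, w + 1):
--                 idx = acc.get((y, x), 0)
--                 if bg:
--                     idx = 511 - idx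
--                 if enh[idx] == "#":
--                     nlit.add((y + 1, x + 1))
--         lit = nlit
--         h += 2
--         w += 2
--         if enh[0] == "#":
--             bg = not bg
--     return len(lit)
-- ===== Notes on version B (the rewrite author's own statement) =====
-- stated objective: alternative
-- what changed: B replaces A's per-cell 3x3 gather over a padded mutable grid (pad, deepcopy, window generator, binary-string parsing) by a scatter pass: each source pixel stamps its 9 neighbour bit-weights into an accumulator dict, a cell's 9-bit index is then a single dict lookup, and when the infinite background is lit the dark in-box cells are the sources and the index is complemented (511 - acc).
-- outside the precondition, e.g. on get_lit_pixels('#.#..#..\n\n..\n.', 1): A returns 15, B returns 16; on get_lit_pixels('.\n\n..', 1): A returns 0, B returns 0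
import Mathlib
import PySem

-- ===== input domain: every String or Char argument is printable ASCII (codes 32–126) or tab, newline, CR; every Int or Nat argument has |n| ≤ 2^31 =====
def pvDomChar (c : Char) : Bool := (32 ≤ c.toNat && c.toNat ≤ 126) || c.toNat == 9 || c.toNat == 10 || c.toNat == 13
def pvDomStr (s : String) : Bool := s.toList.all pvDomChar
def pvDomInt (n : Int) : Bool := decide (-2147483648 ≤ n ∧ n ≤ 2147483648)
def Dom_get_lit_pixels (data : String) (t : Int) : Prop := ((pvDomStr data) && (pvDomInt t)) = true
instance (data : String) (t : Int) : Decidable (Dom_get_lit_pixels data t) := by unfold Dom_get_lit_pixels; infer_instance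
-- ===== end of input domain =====

-- B replaces A's per-cell 3x3 gather over a padded mutable grid by a scatter pass:
-- each source pixel stamps its 9 neighbour weights into an accumulator dict, and the
-- 9-bit index of a cell is a single dict lookup (complemented, 511 - acc, when the
-- infinite background is lit, in which case the dark in-box cells are the sources).

-- ===== PORT A =====

-- get_window(image, y, x, d): the 9 chars of the 3x3 window, row-major, default d
def cellA (image : List (List Char)) (d : Char) (y x : Int) : Char :=
  if _h1 : 0 ≤ y ∧ y < (image.length : Int) then
    let row := image.getD y.toNat []
    if 0 ≤ x ∧ x < (row.length : Int) then row.getD x.toNat d else d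
  else d

def windowA (image : List (List Char)) (d : Char) (y x : Int) : List Char :=
  ([-1, 0, 1] : List Int).flatMap fun yd =>
    ([-1, 0, 1] : List Int).map fun xd => cellA image d (y + yd) (x + xd)

-- int("".join(binary), 2) on a string of '0'/'1' chars is exactly this left fold (hand-ported; exact here)
def indexA (image : List (List Char)) (d : Char) (y x : Int) : Nat :=
  (windowA image d y x).foldl (fun acc c => 2 * acc + (if c = '#' then 1 else 0)) 0

-- the padded image: one border ring of the fill pixel d around image
def paddedOf (image : List (List Char)) (d : Char) (w0 : Nat) : List (List Char) :=
  [List.replicate (w0 + 2) d] ++ image.map (fun l => [d] ++ l ++ [d]) ++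
    [List.replicate (w0 + 2) d]

-- one iteration of A's loop body: pad, recompute every cell, flip the default fill
def stepA (enh : List Char) (st : List (List Char) × Char) : List (List Char) × Char :=
  let image := st.1
  let d := st.2
  let w0 := (image.getD 0 []).length      -- len(image[0]); Pre_ guarantees image ≠ []
  let padded := paddedOf image d w0
  let newimage := (List.range padded.length).map fun (y : Nat) =>
      (List.range (padded.getD y []).length).map fun (x : Nat) =>
        enh.getD (indexA padded d (y : Int) (x : Int)) '.'   -- enchancement[index]; in range under Pre_
  (newimage, if enh.getD 0 '.' = '#' then (if d = '#' then '.' else '#') else d)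

def get_lit_pixels (data : String) (t : Int) : Int :=
  match PySem.Str.split? data "\n\n" with
  | some [e, im] =>
    let enh := e.toList
    let image0 := (PySem.Str.splitlines im).map String.toList
    let fin := (List.range t.toNat).foldl (fun st _ => stepA enh st) (image0, '.')
    ((fin.1.flatten).count '#' : Int)
  | _ => 0   -- data.split("\n\n") does not unpack into two parts: A raises ValueError; outside Pre_

-- ===== PORT B =====

-- the initial set comprehension: lit (y, x) positions of the parsed image, scan order
def litOf (lines : List (List Char)) : List (Int × Int) :=
  (PySem.List.enumerate lines 0).flatMap fun yl =>
    (PySem.List.enumerate yl.2 0).filterMap fun xc =>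
      if xc.2 = '#' then some (yl.1, xc.1) else none

-- OFFSW: the 9 window offsets with their bit weights, row-major
def offsW : List ((Int × Int) × Int) :=
  [((-1, -1), 256), ((-1, 0), 128), ((-1, 1), 64),
   ((0, -1), 32), ((0, 0), 16), ((0, 1), 8),
   ((1, -1), 4), ((1, 0), 2), ((1, 1), 1)]

-- the inner stamping loop: acc[c] = acc.get(c, 0) + wgt for the 9 neighbour cells of p
def stampOne (d : PySem.Dict (Int × Int) Int) (p : Int × Int) : PySem.Dict (Int × Int) Int :=
  offsW.foldl (fun d ow =>
    let c := (p.1 - ow.1.1, p.2 - ow.1.2)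
    d.insert c (d.getD c 0 + ow.2)) d

-- the dark-cell comprehension: in-box cells not in lit, scan order
def darkOf (lit : List (Int × Int)) (h w : Int) : List (Int × Int) :=
  (PySem.List.pyRange 0 h 1).flatMap fun y =>
    ((PySem.List.pyRange 0 w 1).filter (fun x => !decide ((y, x) ∈ lit))).map fun x => (y, x)

-- one iteration of B's loop body: scatter weights from the sources, then one lookup per cell
def stepB (enh : List Char) (st : List (Int × Int) × Int × Int × Bool) :
    List (Int × Int) × Int × Int × Bool :=
  let lit := st.1
  let h := st.2.1
  let w := st.2.2.1
  let bg := st.2.2.2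
  let src := if bg then darkOf lit h w else lit
  let acc := src.foldl stampOne PySem.Dict.empty
  let nlit := (PySem.List.pyRange (-1) (h + 1) 1).foldl (fun a y =>
      (PySem.List.pyRange (-1) (w + 1) 1).foldl (fun a2 x =>
        let idx := acc.getD (y, x) 0
        let idx2 := if bg then 511 - idx else idx
        if enh.getD idx2.toNat '.' = '#' then PySem.Set.add a2 (y + 1, x + 1)
        else a2) a) ([] : PySem.Set (Int × Int))
  (nlit, h + 2, w + 2, if enh.getD 0 '.' = '#' then !bg else bg)

def get_lit_pixels_alt (data : String) (t : Int) : Int :=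
  let parts := (PySem.Str.split? data "\n\n").getD []
  if parts.length = 2 then    -- 'enh, img = data.split("\n\n")': two pieces (guaranteed by Pre_)
    let enh := (parts.getD 0 "").toList
    let lines := (PySem.Str.splitlines (parts.getD 1 "")).map String.toList
    let lit0 : PySem.Set (Int × Int) := PySem.Set.ofList (litOf lines)
    let h0 : Int := lines.length
    let w0 : Int := if lines ≠ [] then (lines.getD 0 []).length else 0
    let fin := (List.range t.toNat).foldl (fun st _ => stepB enh st) (lit0, h0, w0, false)
    (fin.1.length : Int)
  else 0

-- ===== PRECONDITION & SPEC =====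
-- Pre_ excludes: data not splitting into exactly two parts on "\n\n" (A raises ValueError) and,
-- for t > 0, an empty image block (IndexError on image[0]) plus — conservatively, because whether
-- A's enhancement lookups stay in range for a shorter table depends on the evolving image — an
-- enhancement part shorter than 512 chars, and ragged image lines (A pads each row to its own
-- length, an artefact of its per-row padding); on excluded inputs where A still returns, see the
-- cites in the claim.
def Pre_get_lit_pixels (data : String) (t : Int) : Prop :=
  let parts := (PySem.Str.split? data "\n\n").getD []
  parts.length = 2 ∧
  (0 < t →
    let lines := (PySem.Str.splitlines (parts.getD 1 "")).map String.toList
    512 ≤ (parts.getD 0 "").toList.length ∧ lines ≠ [] ∧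
    ∀ l ∈ lines, l.length = (lines.getD 0 []).length)
instance (data : String) (t : Int) : Decidable (Pre_get_lit_pixels data t) := by
  unfold Pre_get_lit_pixels; infer_instance

def pvWitness_get_lit_pixels : String × Int := ("..\n\n#.", 0)
def Spec_get_lit_pixels (data : String) (t : Int) (out : Int) : Prop :=
  out = get_lit_pixels_alt data t

instance (data : String) (t : Int) (out : Int) : Decidable (Spec_get_lit_pixels data t out) := by
  unfold Spec_get_lit_pixels; infer_instance

-- ===== CLAIM (what is proved, stated in full; the proofs are below) =====
def Claim_equal_get_lit_pixels : Prop := ∀ (data : String) (t : Int), Dom_get_lit_pixels data t → Pre_get_lit_pixels data t → Spec_get_lit_pixels data t (get_lit_pixels data t)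

-- ===== LEMMAS AND PROOFS =====

def rowAux (yy s : Int) (l : List Char) : List (Int × Int) :=
  (PySem.List.enumerate l s).filterMap fun xc => if xc.2 = '#' then some (yy, xc.1) else none

def litAux (s : Int) (lines : List (List Char)) : List (Int × Int) :=
  (PySem.List.enumerate lines s).flatMap fun yl => rowAux yl.1 0 yl.2

lemma litOf_eq_aux (lines : List (List Char)) : litOf lines = litAux 0 lines := rfl

lemma rowAux_nil (yy s : Int) : rowAux yy s [] = [] := rfl

lemma rowAux_cons (yy s : Int) (c : Char) (l : List Char) :
    rowAux yy s (c :: l) = (if c = '#' then [(yy, s)] else []) ++ rowAux yy (s + 1) l := by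
  by_cases hc : c = '#' <;>
    simp [rowAux, PySem.List.enumerate_cons, List.filterMap_cons, hc]

lemma mem_rowAux (yy s : Int) (l : List Char) (p : Int × Int) :
    p ∈ rowAux yy s l ↔ ∃ (x : Nat) (_ : x < l.length), l[x] = '#' ∧ p = (yy, s + (x : Int)) := by
  induction l generalizing s with
  | nil => simp [rowAux_nil]
  | cons c l ih =>
    rw [rowAux_cons]
    simp only [List.mem_append, ih]
    constructor
    · rintro (h | ⟨x, hx, hc, rfl⟩)
      · by_cases hc : c = '#' <;> simp [hc] at h
        exact ⟨0, by simp, by simpa using hc, by simp [h]⟩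
      · refine ⟨x + 1, by simpa using hx, by simpa using hc, ?_⟩
        simp only [Prod.mk.injEq, true_and]
        push_cast; ring
    · rintro ⟨x, hx, hc, hp⟩
      cases x with
      | zero =>
        left
        simp at hc hp
        simp [hc, hp]
      | succ x =>
        right
        refine ⟨x, by simpa using hx, by simpa using hc, ?_⟩
        rw [hp]
        simp only [Prod.mk.injEq, true_and]
        push_cast; ring

lemma length_rowAux (yy s : Int) (l : List Char) :
    (rowAux yy s l).length = l.count '#' := by
  induction l generalizing s with
  | nil => simp [rowAux_nil]
  | cons c l ih =>
    rw [rowAux_cons]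
    simp only [List.length_append, ih, List.count_cons]
    by_cases hc : c = '#' <;> simp [hc] <;> omega

lemma nodup_rowAux (yy s : Int) (l : List Char) : (rowAux yy s l).Nodup := by
  induction l generalizing s with
  | nil => simp [rowAux_nil]
  | cons c l ih =>
    rw [rowAux_cons]
    refine List.Nodup.append ?_ (ih (s + 1)) ?_
    · split <;> simp
    · intro p hp hp2
      rw [mem_rowAux] at hp2
      obtain ⟨x, hx, -, hpx⟩ := hp2
      by_cases hc : c = '#' <;> simp [hc] at hp
      rw [hp] at hpx
      have : s = s + 1 + (x : Int) := congrArg Prod.snd hpx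
      omega

lemma litAux_nil (s : Int) : litAux s [] = [] := rfl

lemma litAux_cons (s : Int) (l : List Char) (ls : List (List Char)) :
    litAux s (l :: ls) = rowAux s 0 l ++ litAux (s + 1) ls := by
  simp [litAux, PySem.List.enumerate_cons]

lemma mem_litAux (s : Int) (lines : List (List Char)) (p : Int × Int) :
    p ∈ litAux s lines ↔ ∃ (y : Nat) (hy : y < lines.length) (x : Nat)
      (_ : x < lines[y].length), lines[y][x] = '#' ∧ p = (s + (y : Int), (x : Int)) := by
  induction lines generalizing s with
  | nil => simp [litAux_nil]
  | cons l ls ih =>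
    rw [litAux_cons]
    simp only [List.mem_append, ih, mem_rowAux]
    constructor
    · rintro (⟨x, hx, hc, rfl⟩ | ⟨y, hy, x, hx, hc, rfl⟩)
      · exact ⟨0, by simp, x, by simpa using hx, by simpa using hc, by simp⟩
      · refine ⟨y + 1, by simpa using hy, x, by simpa using hx, by simpa using hc, ?_⟩
        simp only [Prod.mk.injEq, and_true]
        push_cast; ring
    · rintro ⟨y, hy, x, hx, hc, hp⟩
      cases y with
      | zero =>
        left
        refine ⟨x, by simpa using hx, by simpa using hc, ?_⟩
        rw [hp]; simp
      | succ y =>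
        right
        refine ⟨y, by simpa using hy, x, by simpa using hx, by simpa using hc, ?_⟩
        rw [hp]
        simp only [Prod.mk.injEq, and_true]
        push_cast; ring

lemma nodup_litAux (s : Int) (lines : List (List Char)) : (litAux s lines).Nodup := by
  induction lines generalizing s with
  | nil => simp [litAux_nil]
  | cons l ls ih =>
    rw [litAux_cons]
    refine List.Nodup.append (nodup_rowAux s 0 l) (ih (s + 1)) ?_
    intro p hp hp2
    rw [mem_rowAux] at hp
    rw [mem_litAux] at hp2
    obtain ⟨x, hx, -, hpx⟩ := hp
    obtain ⟨y, hy, x2, hx2, -, heq⟩ := hp2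
    rw [hpx] at heq
    have : s = s + 1 + (y : Int) := congrArg Prod.fst heq
    omega

lemma length_litAux (s : Int) (lines : List (List Char)) :
    (litAux s lines).length = lines.flatten.count '#' := by
  induction lines generalizing s with
  | nil => simp [litAux_nil]
  | cons l ls ih =>
    rw [litAux_cons]
    simp [length_rowAux, ih]

-- enumerate of a map over range
lemma enumerate_map_range {α : Type} (m : Nat) (f : Nat → α) :
    PySem.List.enumerate ((List.range m).map f) 0 = (List.range m).map (fun k => (((k : Nat) : Int), f k)) := by
  induction m with
  | zero => simp [PySem.List.enumerate]
  | succ m ih =>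
    rw [List.range_succ, List.map_append, List.map_append, PySem.List.enumerate_append, ih]
    simp [PySem.List.enumerate_cons]

-- membership in the grid flatMap
lemma mem_gridFlat (m n : Nat) (pred : Nat → Nat → Prop) [∀ k j, Decidable (pred k j)]
    (p : Int × Int) :
    p ∈ ((List.range m).flatMap fun k => (List.range n).filterMap fun j =>
        if pred k j then some ((k : Int), (j : Int)) else none) ↔
      ∃ (k : Nat) (_ : k < m) (j : Nat) (_ : j < n), pred k j ∧ p = ((k : Int), (j : Int)) := by
  simp only [List.mem_flatMap, List.mem_filterMap, List.mem_range]
  constructor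
  · rintro ⟨k, hk, j, hj, hif⟩
    by_cases hp : pred k j <;> simp [hp] at hif
    exact ⟨k, hk, j, hj, hp, hif.symm⟩
  · rintro ⟨k, hk, j, hj, hp, rfl⟩
    exact ⟨k, hk, j, hj, by simp [hp]⟩

lemma inner_fold_add (n : Nat) (yy : Int) (pred : Nat → Prop) [DecidablePred pred]
    (acc : List (Int × Int)) (hacc : ∀ j : Nat, j < n → (yy, (j : Int)) ∉ acc) :
    (List.range n).foldl (fun a2 j => if pred j then PySem.Set.add a2 (yy, (j : Int)) else a2) acc
    = acc ++ (List.range n).filterMap (fun j => if pred j then some (yy, (j : Int)) else none) := by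
  induction n generalizing acc with
  | zero => simp
  | succ n ih =>
    rw [List.range_succ, List.foldl_append, List.filterMap_append]
    rw [ih acc (fun j hj => hacc j (by omega))]
    simp only [List.foldl_cons, List.foldl_nil, List.filterMap_cons, List.filterMap_nil]
    by_cases hp : pred n <;> simp only [hp, if_pos, if_neg, if_true, if_false]
    · rw [PySem.Set.add_of_not_mem, List.append_assoc]
      intro hmem
      rcases List.mem_append.mp hmem with h | h
      · exact hacc n (by omega) h
      · rw [List.mem_filterMap] at h
        obtain ⟨j, hj, hif⟩ := h
        rw [List.mem_range] at hj
        by_cases hpj : pred j <;> simp [hpj] at hif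
        omega
    · simp

lemma outer_fold_add' (m n : Nat) (pred : Nat → Nat → Prop) [∀ k j, Decidable (pred k j)]
    (acc : List (Int × Int))
    (hacc : ∀ (k j : Nat), k < m → j < n → ((k : Int), (j : Int)) ∉ acc) :
    (List.range m).foldl (fun acc1 k => (List.range n).foldl
        (fun a2 j => if pred k j then PySem.Set.add a2 ((k : Int), (j : Int)) else a2) acc1) acc
    = acc ++ (List.range m).flatMap (fun k => (List.range n).filterMap fun j =>
        if pred k j then some ((k : Int), (j : Int)) else none) := by
  induction m generalizing acc with
  | zero => simp
  | succ m ih =>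
    rw [List.range_succ, List.foldl_append, List.flatMap_append]
    rw [ih acc (fun k j hk hj => hacc k j (by omega) hj)]
    simp only [List.foldl_cons, List.foldl_nil, List.flatMap_cons, List.flatMap_nil,
      List.append_nil]
    rw [inner_fold_add n (m : Int) (pred m) _ ?_, List.append_assoc]
    intro j hj hmem
    rcases List.mem_append.mp hmem with h | h
    · exact hacc m j (by omega) hj h
    · rw [mem_gridFlat] at h
      obtain ⟨k, hk, j2, hj2, -, heq⟩ := h
      have h2 : (((m : Int), (j : Int)) : Int × Int).1 = (((k : Int), (j2 : Int)) : Int × Int).1 :=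
        congrArg Prod.fst heq
      simp at h2
      omega

lemma litOf_grid (m n : Nat) (f : Nat → Nat → Char) :
    litOf ((List.range m).map fun y => (List.range n).map fun x => f y x)
    = (List.range m).flatMap fun y => (List.range n).filterMap fun x =>
        if f y x = '#' then some ((y : Int), (x : Int)) else none := by
  unfold litOf
  rw [enumerate_map_range, List.flatMap_map]
  simp only [Function.comp_def, enumerate_map_range, List.filterMap_map]

def bgc (bg : Bool) : Char := if bg then '#' else '.'

lemma paddedOf_length (image : List (List Char)) (d : Char) (w0 : Nat) :
    (paddedOf image d w0).length = image.length + 2 := by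
  simp [paddedOf]

lemma paddedOf_getD (image : List (List Char)) (d : Char) (w0 : Nat) (i : Nat) :
    (paddedOf image d w0).getD i [] =
      if i = 0 ∨ i = image.length + 1 then List.replicate (w0 + 2) d
      else if h : i - 1 < image.length then [d] ++ image[i - 1] ++ [d]
      else [] := by
  rcases i with - | k
  · simp [paddedOf]
  · have : paddedOf image d w0 = List.replicate (w0 + 2) d ::
        (image.map (fun l => [d] ++ l ++ [d]) ++ [List.replicate (w0 + 2) d]) := by
      simp [paddedOf]
    rw [this, List.getD_cons_succ]
    by_cases hk : k < image.length
    · rw [List.getD_eq_getElem?_getD, List.getElem?_append_left (by simpa using hk)]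
      simp only [List.getElem?_map, List.getElem?_eq_getElem hk, Option.map_some,
        Option.getD_some]
      rw [if_neg (by omega), dif_pos (by omega)]
      simp
    · by_cases hk2 : k = image.length
      · subst hk2
        rw [List.getD_eq_getElem?_getD, List.getElem?_append_right (by simp)]
        rw [if_pos (Or.inr rfl)]
        simp
      · rw [List.getD_eq_getElem?_getD, List.getElem?_eq_none (by simp; omega)]
        rw [if_neg (by omega), dif_neg (by omega)]
        simp

lemma cellA_paddedOf (image : List (List Char)) (d : Char) (w0 : Nat)
    (hrect : ∀ l ∈ image, l.length = w0) (yy xx : Int) :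
    cellA (paddedOf image d w0) d yy xx =
      if 0 ≤ yy - 1 ∧ yy - 1 < (image.length : Int) ∧ 0 ≤ xx - 1 ∧ xx - 1 < (w0 : Int)
      then (image.getD (yy - 1).toNat []).getD (xx - 1).toNat d else d := by
  have hrepl : ∀ k : Nat, (List.replicate (w0 + 2) d).getD k d = d := by
    intro k
    rw [List.getD_eq_getElem?_getD, List.getElem?_replicate]
    split <;> simp
  simp only [cellA, paddedOf_length]
  by_cases hy : 0 ≤ yy ∧ yy < ((image.length : Int) + 2)
  case neg =>
    rw [dif_neg (by push_cast; omega), if_neg (by omega)]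
  case pos =>
    rw [dif_pos (by push_cast; omega)]
    rw [paddedOf_getD]
    by_cases hy0 : yy.toNat = 0 ∨ yy.toNat = image.length + 1
    case pos =>
      rw [if_pos hy0]
      have hval : (if 0 ≤ xx ∧ xx < ((List.replicate (w0 + 2) d).length : Int)
          then (List.replicate (w0 + 2) d).getD xx.toNat d else d) = d := by
        split
        · exact hrepl _
        · rfl
      rw [hval, if_neg (by omega)]
    case neg =>
      rw [if_neg hy0, dif_pos (by omega)]
      push_neg at hy0
      have hrl : image[yy.toNat - 1].length = w0 := hrect _ (List.getElem_mem _)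
      have hlen2 : (([d] ++ image[yy.toNat - 1] ++ [d]).length : Int) = (w0 : Int) + 2 := by
        simp [hrl]
        omega
      by_cases hx : 1 ≤ xx ∧ xx ≤ (w0 : Int)
      case pos =>
        have hval : (if 0 ≤ xx ∧ xx < (([d] ++ image[yy.toNat - 1] ++ [d]).length : Int)
            then ([d] ++ image[yy.toNat - 1] ++ [d]).getD xx.toNat d else d)
            = image[yy.toNat - 1].getD (xx.toNat - 1) d := by
          rw [if_pos (by rw [hlen2]; omega)]
          rw [List.getD_eq_getElem?_getD, List.getD_eq_getElem?_getD,
            List.append_assoc, List.singleton_append]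
          obtain ⟨j, hj⟩ : ∃ j, xx.toNat = j + 1 := ⟨xx.toNat - 1, by omega⟩
          rw [hj, List.getElem?_cons_succ, List.getElem?_append_left (by omega)]
          simp
        rw [hval, if_pos (by omega)]
        have hb1 : (yy - 1).toNat < image.length := by omega
        have h1 : (yy - 1).toNat = yy.toNat - 1 := by omega
        have h2 : (xx - 1).toNat = xx.toNat - 1 := by omega
        have hb1' : yy.toNat - 1 < image.length := by omega
        have hrow2 : image.getD (yy - 1).toNat [] = image[yy.toNat - 1] := by
          rw [List.getD_eq_getElem?_getD, h1, List.getElem?_eq_getElem hb1', Option.getD_some]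
        rw [hrow2, h2]
      case neg =>
        have hval : (if 0 ≤ xx ∧ xx < (([d] ++ image[yy.toNat - 1] ++ [d]).length : Int)
            then ([d] ++ image[yy.toNat - 1] ++ [d]).getD xx.toNat d else d) = d := by
          by_cases hxr : 0 ≤ xx ∧ xx < ((w0 : Int) + 2)
          case neg => rw [if_neg (by rw [hlen2]; omega)]
          case pos =>
            rw [if_pos (by rw [hlen2]; omega)]
            rcases (by omega : xx.toNat = 0 ∨ xx.toNat = w0 + 1) with h0 | h0
            · rw [h0]
              simp
            · rw [h0, List.getD_eq_getElem?_getD, List.append_assoc, List.singleton_append,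
                List.getElem?_cons_succ, List.getElem?_append_right (by simp [hrl])]
              simp [hrl]
        rw [hval, if_neg (by omega)]

-- the gather-style 9-bit index: A's window fold re-expressed over the sparse state
def indexG (lit : List (Int × Int)) (h w : Int) (bg : Bool) (y x : Int) : Nat :=
  ([-1, 0, 1] : List Int).foldl (fun acc dy =>
    ([-1, 0, 1] : List Int).foldl (fun acc2 dx =>
      let yy := y + dy
      let xx := x + dx
      let on := if 0 ≤ yy ∧ yy < h ∧ 0 ≤ xx ∧ xx < w then decide ((yy, xx) ∈ lit) else bg
      2 * acc2 + (if on then 1 else 0)) acc) 0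

-- the gather-style iteration (proof-side reference point between stepA and stepB)
def stepG (enh : List Char) (st : List (Int × Int) × Int × Int × Bool) :
    List (Int × Int) × Int × Int × Bool :=
  let lit := st.1
  let h := st.2.1
  let w := st.2.2.1
  let bg := st.2.2.2
  let nlit := (PySem.List.pyRange (-1) (h + 1) 1).foldl (fun acc y =>
      (PySem.List.pyRange (-1) (w + 1) 1).foldl (fun acc2 x =>
        if enh.getD (indexG lit h w bg y x) '.' = '#' then PySem.Set.add acc2 (y + 1, x + 1)
        else acc2) acc) ([] : PySem.Set (Int × Int))
  (nlit, h + 2, w + 2, if enh.getD 0 '.' = '#' then !bg else bg)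

lemma index_eq (image : List (List Char)) (lit : List (Int × Int)) (bg : Bool) (w0 : Nat)
    (hrect : ∀ l ∈ image, l.length = w0)
    (hlit : ∀ p : Int × Int, p ∈ lit ↔ ∃ (y : Nat) (hy : y < image.length) (x : Nat)
      (_ : x < image[y].length), image[y][x] = '#' ∧ p = ((y : Int), (x : Int)))
    (u v : Int) :
    indexA (paddedOf image (bgc bg) w0) (bgc bg) (u + 1) (v + 1)
      = indexG lit (image.length : Int) (w0 : Int) bg u v := by
  have hbit : ∀ dy dx : Int,
      (if cellA (paddedOf image (bgc bg) w0) (bgc bg) (u + 1 + dy) (v + 1 + dx) = '#'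
        then (1 : Nat) else 0)
      = (if (if 0 ≤ u + dy ∧ u + dy < (image.length : Int) ∧ 0 ≤ v + dx ∧ v + dx < (w0 : Int)
          then decide ((u + dy, v + dx) ∈ lit) else bg) = true then (1 : Nat) else 0) := by
    intro dy dx
    rw [cellA_paddedOf image (bgc bg) w0 hrect]
    have e1 : u + 1 + dy - 1 = u + dy := by ring
    have e2 : v + 1 + dx - 1 = v + dx := by ring
    rw [e1, e2]
    by_cases hbox : 0 ≤ u + dy ∧ u + dy < (image.length : Int) ∧ 0 ≤ v + dx ∧ v + dx < (w0 : Int)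
    · rw [if_pos hbox, if_pos hbox]
      obtain ⟨b1, b2, b3, b4⟩ := hbox
      have hyn : (u + dy).toNat < image.length := by omega
      have hrl : image[(u + dy).toNat].length = w0 := hrect _ (List.getElem_mem _)
      have hxn : (v + dx).toNat < image[(u + dy).toNat].length := by rw [hrl]; omega
      have hcell : (image.getD (u + dy).toNat []).getD (v + dx).toNat (bgc bg)
          = image[(u + dy).toNat][(v + dx).toNat] := by
        rw [List.getD_eq_getElem?_getD, List.getD_eq_getElem?_getD,
          List.getElem?_eq_getElem hyn, Option.getD_some,
          List.getElem?_eq_getElem hxn, Option.getD_some]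
      rw [hcell]
      by_cases hmem : (u + dy, v + dx) ∈ lit
      · have hd : decide ((u + dy, v + dx) ∈ lit) = true := by simp [hmem]
        rw [hd, if_pos rfl]
        rw [hlit] at hmem
        obtain ⟨y, hy, x, hx, hc, heq⟩ := hmem
        have hy2 : (u + dy) = (y : Int) := congrArg Prod.fst heq
        have hx2 : (v + dx) = (x : Int) := congrArg Prod.snd heq
        have hy3 : (u + dy).toNat = y := by omega
        have hx3 : (v + dx).toNat = x := by omega
        simp [hy3, hx3, hc]
      · have hd : decide ((u + dy, v + dx) ∈ lit) = false := by simp [hmem]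
        rw [hd]
        simp only [Bool.false_eq_true, if_false]
        rw [if_neg ?_]
        intro hc
        apply hmem
        rw [hlit]
        refine ⟨(u + dy).toNat, hyn, (v + dx).toNat, hxn, hc, ?_⟩
        simp only [Prod.mk.injEq]
        constructor <;> omega
    · rw [if_neg hbox, if_neg hbox]
      cases bg <;> simp [bgc]
  simp only [indexA, windowA, indexG, List.flatMap_cons, List.flatMap_nil, List.map_cons,
    List.map_nil, List.foldl_cons, List.foldl_nil, List.append_nil, List.cons_append,
    List.nil_append]
  simp only [hbit]

lemma paddedOf_row_length (image : List (List Char)) (d : Char) (w0 : Nat)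
    (hrect : ∀ l ∈ image, l.length = w0) (i : Nat) (hi : i < image.length + 2) :
    ((paddedOf image d w0).getD i []).length = w0 + 2 := by
  rw [paddedOf_getD]
  split_ifs with hA hB
  · simp
  · have := hrect _ (List.getElem_mem hB)
    simp [this]
  · omega

lemma mem_litOf (lines : List (List Char)) (p : Int × Int) :
    p ∈ litOf lines ↔ ∃ (y : Nat) (hy : y < lines.length) (x : Nat)
      (_ : x < lines[y].length), lines[y][x] = '#' ∧ p = ((y : Int), (x : Int)) := by
  rw [litOf_eq_aux, mem_litAux]
  simp only [zero_add]

def InvG (stA : List (List Char) × Char) (stB : List (Int × Int) × Int × Int × Bool) : Prop :=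
  stB.1 = litOf stA.1 ∧
  stB.2.1 = (stA.1.length : Int) ∧
  stB.2.2.1 = ((stA.1.getD 0 []).length : Int) ∧
  (∀ l ∈ stA.1, l.length = (stA.1.getD 0 []).length) ∧
  stA.1 ≠ [] ∧
  stA.2 = bgc stB.2.2.2

lemma step_preserve (enh : List Char) (stA : List (List Char) × Char)
    (stB : List (Int × Int) × Int × Int × Bool) (hInv : InvG stA stB) :
    InvG (stepA enh stA) (stepG enh stB) := by
  obtain ⟨image, d⟩ := stA
  obtain ⟨lit, h, w, bg⟩ := stB
  obtain ⟨hl, hh, hw, hrect, hne, hd⟩ := hInv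
  simp only at hl hh hw hrect hne hd
  subst hh hw hd
  have hm : (paddedOf image (bgc bg) (image.getD 0 []).length).length = image.length + 2 :=
    paddedOf_length image (bgc bg) (image.getD 0 []).length
  have hni : (stepA enh (image, bgc bg)).1 = (List.range (image.length + 2)).map fun (y : Nat) =>
      (List.range ((image.getD 0 []).length + 2)).map fun (x : Nat) =>
        enh.getD (indexA (paddedOf image (bgc bg) (image.getD 0 []).length) (bgc bg)
          (y : Int) (x : Int)) '.' := by
    simp only [stepA]
    rw [hm]
    refine List.map_congr_left ?_
    intro y hy
    rw [List.mem_range] at hy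
    rw [paddedOf_row_length image (bgc bg) (image.getD 0 []).length hrect y hy]
  have hIdx : ∀ k j : Int,
      indexG lit ((image.length : Int)) (((image.getD 0 []).length : Int)) bg (-1 + k) (-1 + j)
        = indexA (paddedOf image (bgc bg) (image.getD 0 []).length) (bgc bg) k j := by
    intro k j
    have := index_eq image lit bg (image.getD 0 []).length hrect
      (fun p => by rw [hl]; exact mem_litOf image p) (-1 + k) (-1 + j)
    rw [show (-1 : Int) + k + 1 = k by ring, show (-1 : Int) + j + 1 = j by ring] at this
    exact this.symm
  have hnl : (stepG enh (lit, (image.length : Int), ((image.getD 0 []).length : Int), bg)).1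
      = litOf ((stepA enh (image, bgc bg)).1) := by
    rw [hni, litOf_grid]
    simp only [stepG]
    rw [PySem.List.pyRange_one, PySem.List.pyRange_one]
    rw [show ((image.length : Int) + 1 - (-1)).toNat = image.length + 2 by omega]
    rw [show (((image.getD 0 []).length : Int) + 1 - (-1)).toNat
      = (image.getD 0 []).length + 2 by omega]
    rw [List.foldl_map]
    have hinner : ∀ (acc : PySem.Set (Int × Int)) (k : Nat),
        (((List.range ((image.getD 0 []).length + 2)).map fun (j : Nat) => -1 + (j : Int)).foldl
          (fun acc2 x => if enh.getD (indexG lit ((image.length : Int))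
              (((image.getD 0 []).length : Int)) bg (-1 + (k : Int)) x) '.' = '#'
            then PySem.Set.add acc2 (-1 + (k : Int) + 1, x + 1) else acc2) acc)
        = (List.range ((image.getD 0 []).length + 2)).foldl
          (fun acc2 (j : Nat) => if enh.getD (indexA (paddedOf image (bgc bg)
              (image.getD 0 []).length) (bgc bg) ((k : Int)) ((j : Int))) '.' = '#'
            then PySem.Set.add acc2 ((k : Int), (j : Int)) else acc2) acc := by
      intro acc k
      rw [List.foldl_map]
      refine PySem.List.foldl_congr_mem _ _ _ acc ?_
      intro acc2 j hj
      rw [hIdx ((k : Nat) : Int) ((j : Nat) : Int),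
        show (-1 : Int) + ((k : Nat) : Int) + 1 = ((k : Nat) : Int) by ring,
        show (-1 : Int) + ((j : Nat) : Int) + 1 = ((j : Nat) : Int) by ring]
    rw [PySem.List.foldl_congr_mem _ _ _ ([] : PySem.Set (Int × Int))
      (fun acc k _ => hinner acc k)]
    · rw [outer_fold_add' (image.length + 2) ((image.getD 0 []).length + 2)
        (fun k j => enh.getD (indexA (paddedOf image (bgc bg) (image.getD 0 []).length)
          (bgc bg) ((k : Int)) ((j : Int))) '.' = '#') [] (by intro k j _ _ hmem; simp at hmem)]
      rw [List.nil_append]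
  refine ⟨hnl, ?_, ?_, ?_, ?_, ?_⟩
  · simp only [stepG]
    rw [hni]
    simp only [List.length_map, List.length_range]
    push_cast
    ring
  · simp only [stepG]
    rw [hni]
    have h0 : ((List.range (image.length + 2)).map fun (y : Nat) =>
        (List.range ((image.getD 0 []).length + 2)).map fun (x : Nat) =>
          enh.getD (indexA (paddedOf image (bgc bg) (image.getD 0 []).length) (bgc bg)
            (y : Int) (x : Int)) '.').getD 0 []
        = (List.range ((image.getD 0 []).length + 2)).map fun (x : Nat) =>
          enh.getD (indexA (paddedOf image (bgc bg) (image.getD 0 []).length) (bgc bg)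
            ((0 : Nat) : Int) (x : Int)) '.' := by
      rw [List.getD_eq_getElem?_getD, List.getElem?_map, List.getElem?_range (by omega)]
      simp
    rw [h0]
    simp only [List.length_map, List.length_range]
    push_cast
    ring
  · rw [hni]
    intro l hlmem
    rw [List.mem_map] at hlmem
    obtain ⟨y, hy, rfl⟩ := hlmem
    have h0 : ((List.range (image.length + 2)).map fun (y : Nat) =>
        (List.range ((image.getD 0 []).length + 2)).map fun (x : Nat) =>
          enh.getD (indexA (paddedOf image (bgc bg) (image.getD 0 []).length) (bgc bg)
            (y : Int) (x : Int)) '.').getD 0 []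
        = (List.range ((image.getD 0 []).length + 2)).map fun (x : Nat) =>
          enh.getD (indexA (paddedOf image (bgc bg) (image.getD 0 []).length) (bgc bg)
            ((0 : Nat) : Int) (x : Int)) '.' := by
      rw [List.getD_eq_getElem?_getD, List.getElem?_map, List.getElem?_range (by omega)]
      simp
    rw [h0]
    simp
  · rw [hni]
    simp
  · simp only [stepA, stepG]
    by_cases hE : enh.getD 0 '.' = '#' <;> cases bg <;> simp [bgc, hE]

lemma foldl_preserve (enh : List Char) : ∀ (n : Nat) (stA : List (List Char) × Char)
    (stB : List (Int × Int) × Int × Int × Bool), InvG stA stB →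
    InvG ((List.range n).foldl (fun st _ => stepA enh st) stA)
         ((List.range n).foldl (fun st _ => stepG enh st) stB) := by
  intro n
  induction n with
  | zero => intro stA stB h; simpa using h
  | succ n ih =>
    intro stA stB h
    rw [List.range_succ, List.foldl_append, List.foldl_append]
    exact step_preserve enh _ _ (ih stA stB h)

lemma length_litOf (lines : List (List Char)) :
    (litOf lines).length = lines.flatten.count '#' := by
  rw [litOf_eq_aux, length_litAux]

-- ===== scatter ↔ gather =====

-- the total weight source pixel p contributes to the accumulator of cell c
def wAt (c p : Int × Int) : Int :=
  (offsW.map (fun ow => if (c.1 + ow.1.1, c.2 + ow.1.2) = p then ow.2 else 0)).sum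

lemma getD_stamp_aux (offs : List ((Int × Int) × Int)) (d : PySem.Dict (Int × Int) Int)
    (p c : Int × Int) :
    (offs.foldl (fun d ow =>
        let c := (p.1 - ow.1.1, p.2 - ow.1.2)
        d.insert c (d.getD c 0 + ow.2)) d).getD c 0
      = d.getD c 0 + (offs.map (fun ow => if (c.1 + ow.1.1, c.2 + ow.1.2) = p then ow.2 else 0)).sum := by
  induction offs generalizing d with
  | nil => simp
  | cons ow offs ih =>
    rw [List.foldl_cons, ih]
    simp only [List.map_cons, List.sum_cons, PySem.Dict.getD_insert]
    have hiff : (c = (p.1 - ow.1.1, p.2 - ow.1.2)) ↔ ((c.1 + ow.1.1, c.2 + ow.1.2) = p) := by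
      constructor <;> (intro h; rw [Prod.ext_iff] at h ⊢; simp only [] at h ⊢; constructor <;> omega)
    by_cases hc : c = (p.1 - ow.1.1, p.2 - ow.1.2)
    · rw [if_pos hc, if_pos (hiff.mp hc), hc]; ring
    · rw [if_neg hc, if_neg (fun h => hc (hiff.mpr h))]; ring

lemma getD_stampOne (d : PySem.Dict (Int × Int) Int) (p c : Int × Int) :
    (stampOne d p).getD c 0 = d.getD c 0 + wAt c p :=
  getD_stamp_aux offsW d p c

lemma getD_fold_stampOne (src : List (Int × Int)) (d : PySem.Dict (Int × Int) Int)
    (c : Int × Int) :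
    (src.foldl stampOne d).getD c 0 = d.getD c 0 + (src.map (wAt c)).sum := by
  induction src generalizing d with
  | nil => simp
  | cons p src ih =>
    rw [List.foldl_cons, ih, getD_stampOne]
    simp only [List.map_cons, List.sum_cons]
    ring

-- for a duplicate-free source list, the accumulated weight at c is the weighted
-- membership sum over the 9 offsets
lemma sum_wAt_eq (c : Int × Int) (src : List (Int × Int)) (hnd : src.Nodup) :
    (src.map (wAt c)).sum
      = (offsW.map (fun ow => if (c.1 + ow.1.1, c.2 + ow.1.2) ∈ src then ow.2 else 0)).sum := by
  induction src with
  | nil => simp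
  | cons p rest ih =>
    obtain ⟨hp, hrest⟩ := List.nodup_cons.mp hnd
    rw [List.map_cons, List.sum_cons, ih hrest]
    have hsplit : ∀ ow : (Int × Int) × Int,
        (if (c.1 + ow.1.1, c.2 + ow.1.2) ∈ p :: rest then ow.2 else 0)
          = (if (c.1 + ow.1.1, c.2 + ow.1.2) = p then ow.2 else 0)
            + (if (c.1 + ow.1.1, c.2 + ow.1.2) ∈ rest then ow.2 else 0) := by
      intro ow
      by_cases h1 : (c.1 + ow.1.1, c.2 + ow.1.2) = p
      · have h2 : (c.1 + ow.1.1, c.2 + ow.1.2) ∉ rest := h1 ▸ hp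
        rw [if_pos (by rw [h1]; exact List.mem_cons_self ..), if_pos h1, if_neg h2]
        ring
      · by_cases h2 : (c.1 + ow.1.1, c.2 + ow.1.2) ∈ rest
        · rw [if_pos (List.mem_cons_of_mem _ h2), if_neg h1, if_pos h2]
          ring
        · rw [if_neg (by simp [List.mem_cons, h1, h2]), if_neg h1, if_neg h2]
          ring
    rw [List.map_congr_left (fun ow _ => hsplit ow), PySem.List.sum_map_add_int]
    rw [wAt]

-- evaluate the gather index as a weighted sum over the 9 offsets
lemma indexG_eval (lit : List (Int × Int)) (h w : Int) (bg : Bool) (y x : Int) :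
    ((indexG lit h w bg y x : Nat) : Int)
      = (offsW.map (fun ow =>
          if (if 0 ≤ y + ow.1.1 ∧ y + ow.1.1 < h ∧ 0 ≤ x + ow.1.2 ∧ x + ow.1.2 < w
              then decide ((y + ow.1.1, x + ow.1.2) ∈ lit) else bg) = true
          then ow.2 else 0)).sum := by
  calc ((indexG lit h w bg y x : Nat) : Int)
      = (offsW.map (fun ow => ow.2 *
          (if (if 0 ≤ y + ow.1.1 ∧ y + ow.1.1 < h ∧ 0 ≤ x + ow.1.2 ∧ x + ow.1.2 < w
              then decide ((y + ow.1.1, x + ow.1.2) ∈ lit) else bg) = true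
            then (1 : Int) else 0))).sum := by
        simp only [indexG, offsW, List.foldl_cons, List.foldl_nil, List.map_cons, List.map_nil,
          List.sum_cons, List.sum_nil]
        push_cast [Nat.cast_ite]
        ring
    _ = _ := by
        refine congrArg List.sum (List.map_congr_left ?_)
        intro ow _
        cases hb : (if 0 ≤ y + ow.1.1 ∧ y + ow.1.1 < h ∧ 0 ≤ x + ow.1.2 ∧ x + ow.1.2 < w
            then decide ((y + ow.1.1, x + ow.1.2) ∈ lit) else bg) <;> simp [hb]

lemma mem_darkOf (lit : List (Int × Int)) (h w : Int) (q : Int × Int) :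
    q ∈ darkOf lit h w ↔ 0 ≤ q.1 ∧ q.1 < h ∧ 0 ≤ q.2 ∧ q.2 < w ∧ q ∉ lit := by
  unfold darkOf
  simp only [List.mem_flatMap, List.mem_map, List.mem_filter, PySem.List.mem_pyRange_one,
    Bool.not_eq_eq_eq_not, Bool.not_true, decide_eq_false_iff_not]
  constructor
  · rintro ⟨y, hy, x, ⟨⟨hx, hnm⟩, rfl⟩⟩
    exact ⟨hy.1, hy.2, hx.1, hx.2, hnm⟩
  · rintro ⟨h1, h2, h3, h4, h5⟩
    exact ⟨q.1, ⟨h1, h2⟩, q.2, ⟨⟨⟨h3, h4⟩, by simpa using h5⟩, rfl⟩⟩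

lemma nodup_darkOf (lit : List (Int × Int)) (h w : Int) : (darkOf lit h w).Nodup := by
  unfold darkOf
  rw [List.flatMap_def, List.nodup_flatten]
  constructor
  · intro l hl
    rw [List.mem_map] at hl
    obtain ⟨y, -, rfl⟩ := hl
    exact (((PySem.List.nodup_pyRange_one 0 w).filter _).map
      (fun a b hab => by simpa using congrArg Prod.snd hab))
  · refine List.Pairwise.map _ ?_ (PySem.List.pairwise_lt_pyRange_one 0 h)
    intro y1 y2 hlt q hq1 hq2
    rw [List.mem_map] at hq1 hq2
    obtain ⟨x1, -, rfl⟩ := hq1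
    obtain ⟨x2, -, heq⟩ := hq2
    have := congrArg Prod.fst heq
    simp at this
    omega

-- bg = false: the index of cell (y, x) is one lookup in the scatter accumulator
lemma cell_false (lit : List (Int × Int)) (h w : Int)
    (hnd : lit.Nodup)
    (hsub : ∀ p ∈ lit, 0 ≤ p.1 ∧ p.1 < h ∧ 0 ≤ p.2 ∧ p.2 < w) (y x : Int) :
    (lit.foldl stampOne PySem.Dict.empty).getD (y, x) 0
      = ((indexG lit h w false y x : Nat) : Int) := by
  rw [getD_fold_stampOne, PySem.Dict.getD_empty, zero_add, sum_wAt_eq _ _ hnd, indexG_eval]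
  refine congrArg List.sum (List.map_congr_left ?_)
  intro ow _
  by_cases hm : ((y, x).1 + ow.1.1, (y, x).2 + ow.1.2) ∈ lit
  · have hbox := hsub _ hm
    simp only at hbox
    rw [if_pos hm, if_pos]
    simp [hbox.1, hbox.2.1, hbox.2.2.1, hbox.2.2.2, hm]
  · rw [if_neg hm]
    have hz : (if 0 ≤ y + ow.1.1 ∧ y + ow.1.1 < h ∧ 0 ≤ x + ow.1.2 ∧ x + ow.1.2 < w
        then decide ((y + ow.1.1, x + ow.1.2) ∈ lit) else false) = false := by
      split
      · exact decide_eq_false hm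
      · rfl
    rw [hz]
    simp

-- bg = true: the index is the complement of the dark-cell scatter accumulator
lemma cell_true (lit : List (Int × Int)) (h w : Int) (y x : Int) :
    511 - ((darkOf lit h w).foldl stampOne PySem.Dict.empty).getD (y, x) 0
      = ((indexG lit h w true y x : Nat) : Int) := by
  rw [getD_fold_stampOne, PySem.Dict.getD_empty, zero_add,
    sum_wAt_eq _ _ (nodup_darkOf lit h w), indexG_eval]
  have hterm : ∀ ow : (Int × Int) × Int,
      (if (if 0 ≤ y + ow.1.1 ∧ y + ow.1.1 < h ∧ 0 ≤ x + ow.1.2 ∧ x + ow.1.2 < w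
          then decide ((y + ow.1.1, x + ow.1.2) ∈ lit) else true) = true
        then ow.2 else 0)
      = ow.2 - (if ((y, x).1 + ow.1.1, (y, x).2 + ow.1.2) ∈ darkOf lit h w then ow.2 else 0) := by
    intro ow
    by_cases hbox : 0 ≤ y + ow.1.1 ∧ y + ow.1.1 < h ∧ 0 ≤ x + ow.1.2 ∧ x + ow.1.2 < w
    · by_cases hm : (y + ow.1.1, x + ow.1.2) ∈ lit
      · have hdk : ((y, x).1 + ow.1.1, (y, x).2 + ow.1.2) ∉ darkOf lit h w := by
          rw [mem_darkOf]
          simp only [not_and, not_not]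
          intro _ _ _ _
          exact hm
        rw [if_pos (by simp [hbox, hm]), if_neg hdk]
        ring
      · have hdk : ((y, x).1 + ow.1.1, (y, x).2 + ow.1.2) ∈ darkOf lit h w := by
          rw [mem_darkOf]
          exact ⟨hbox.1, hbox.2.1, hbox.2.2.1, hbox.2.2.2, hm⟩
        rw [if_neg (by simp [hbox, hm]), if_pos hdk]
        ring
    · have hdk : ((y, x).1 + ow.1.1, (y, x).2 + ow.1.2) ∉ darkOf lit h w := by
        rw [mem_darkOf]
        intro hc
        exact hbox ⟨hc.1, hc.2.1, hc.2.2.1, hc.2.2.2.1⟩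
      rw [if_pos (by simp [hbox]), if_neg hdk]
      ring
  rw [List.map_congr_left (fun ow _ => hterm ow)]
  simp only [offsW, List.map_cons, List.map_nil, List.sum_cons, List.sum_nil]
  ring

lemma stepB_eq_stepG (enh : List Char) (st : List (Int × Int) × Int × Int × Bool)
    (hnd : st.1.Nodup)
    (hsub : ∀ p ∈ st.1, 0 ≤ p.1 ∧ p.1 < st.2.1 ∧ 0 ≤ p.2 ∧ p.2 < st.2.2.1) :
    stepB enh st = stepG enh st := by
  obtain ⟨lit, h, w, bg⟩ := st
  simp only at hnd hsub
  cases bg with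
  | false =>
    simp only [stepB, stepG, Bool.false_eq_true, if_false]
    refine Prod.ext ?_ rfl
    simp only
    refine PySem.List.foldl_congr_mem _ _ _ _ ?_
    intro a y _
    refine PySem.List.foldl_congr_mem _ _ _ _ ?_
    intro a2 x _
    rw [cell_false lit h w hnd hsub y x, Int.toNat_natCast]
  | true =>
    simp only [stepB, stepG, if_true]
    refine Prod.ext ?_ rfl
    simp only
    refine PySem.List.foldl_congr_mem _ _ _ _ ?_
    intro a y _
    refine PySem.List.foldl_congr_mem _ _ _ _ ?_
    intro a2 x _
    rw [cell_true lit h w y x, Int.toNat_natCast]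

lemma foldB_eq_foldG (enh : List Char) (n : Nat) (stA : List (List Char) × Char)
    (stB : List (Int × Int) × Int × Int × Bool) (hInv : InvG stA stB) :
    (List.range n).foldl (fun st _ => stepB enh st) stB
      = (List.range n).foldl (fun st _ => stepG enh st) stB := by
  induction n with
  | zero => rfl
  | succ n ih =>
    rw [List.range_succ, List.foldl_append, List.foldl_append, ih]
    simp only [List.foldl_cons, List.foldl_nil]
    obtain ⟨hl, hh, hw, hrect, hne, -⟩ := foldl_preserve enh n stA stB hInv
    refine stepB_eq_stepG enh _ ?_ ?_
    · rw [hl, litOf_eq_aux]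
      exact nodup_litAux 0 _
    · intro p hp
      rw [hl, mem_litOf] at hp
      obtain ⟨y, hy, x, hx, -, rfl⟩ := hp
      have hrl := hrect _ (List.getElem_mem hy)
      rw [hh, hw]
      refine ⟨?_, ?_, ?_, ?_⟩
      · show (0 : Int) ≤ (y : Nat)
        positivity
      · show ((y : Nat) : Int) < _
        exact_mod_cast hy
      · show (0 : Int) ≤ (x : Nat)
        positivity
      · show ((x : Nat) : Int) < _
        rw [← hrl] at *
        exact_mod_cast hx

-- ===== VERDICT (by name: the statement is the Claim_ definition above) =====
theorem get_lit_pixels_spec : Claim_equal_get_lit_pixels := by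
  intro data t _ hPre
  unfold Spec_get_lit_pixels
  simp only [Pre_get_lit_pixels] at hPre
  obtain ⟨hparts, hrest⟩ := hPre
  cases hsp : PySem.Str.split? data "\n\n" with
  | none => rw [hsp] at hparts; simp at hparts
  | some parts =>
    rw [hsp] at hparts hrest
    match parts, hparts with
    | [e, im], _ =>
      unfold get_lit_pixels get_lit_pixels_alt
      rw [hsp]
      simp only [Option.getD_some, List.getD_cons_zero, List.getD_cons_succ,
        List.length_cons, List.length_nil] at hrest ⊢
      rw [if_pos trivial]
      have hnd : (litOf ((PySem.Str.splitlines im).map String.toList)).Nodup := by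
        rw [litOf_eq_aux]; exact nodup_litAux _ _
      have hof := PySem.Set.ofList_eq_self_of_nodup _ hnd
      by_cases ht : 0 < t
      · obtain ⟨-, hne, hrect⟩ := hrest ht
        have hInv0 : InvG (((PySem.Str.splitlines im).map String.toList), '.')
            ((PySem.Set.ofList (litOf ((PySem.Str.splitlines im).map String.toList)) :
                PySem.Set (Int × Int)),
             (((PySem.Str.splitlines im).map String.toList).length : Int),
             (if ((PySem.Str.splitlines im).map String.toList) ≠ [] then
                ((((PySem.Str.splitlines im).map String.toList).getD 0 []).length : Int) else 0),
             false) := by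
          refine ⟨hof, rfl, ?_, hrect, hne, rfl⟩
          simp only [if_pos hne]
        rw [foldB_eq_foldG e.toList t.toNat _ _ hInv0]
        have hfin := foldl_preserve e.toList t.toNat _ _ hInv0
        obtain ⟨hl, -, -, -, -, -⟩ := hfin
        rw [hl, length_litOf]
      · have h0 : t.toNat = 0 := by omega
        rw [h0]
        simp only [List.range_zero, List.foldl_nil]
        rw [hof, length_litOf]
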